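-- pv_equiv track=rewrite | github.com/Y0101-p/DSA | openjudge/18159.py | oula
-- ===== SOURCE A (Python) =====
-- def oula(n):
--     hax = [True] * (n + 1)
--     prime = []
--     ans = []
--     for i in range(2, n + 1):
--         if hax[i]:
--             prime.append(i)
--             if str(i)[-1] == '1':
--                 ans.append(i)
--             hax[i] = False
--         for j in prime:
--             t = i * j
--             if t > n:
--                 break
--             hax[t] = False
--             if i % j == 0:
--                 break
--     return ans
-- ===== SOURCE B (Python) =====
-- def oula(n):
--     # Classic sieve of Eratosthenes: strike multiples of each prime directly.
--     hax = [True] * (n + 1)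
--     ans = []
--     for i in range(2, n + 1):
--         if hax[i]:
--             if i % 10 == 1:
--                 ans.append(i)
--             for t in range(2 * i, n + 1, i):
--                 hax[t] = False
--     return ans
-- ===== Notes on version B (the rewrite author's own statement) =====
-- stated objective: alternative
-- what changed: Replaces A's linear sieve (explicit prime list, inner loop over primes with i%j==0 break, str(i)[-1] digit test) by a classic sieve of Eratosthenes that strikes multiples of each surviving i directly with a stepped range and tests the last digit with i % 10 == 1.
import Mathlib
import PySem

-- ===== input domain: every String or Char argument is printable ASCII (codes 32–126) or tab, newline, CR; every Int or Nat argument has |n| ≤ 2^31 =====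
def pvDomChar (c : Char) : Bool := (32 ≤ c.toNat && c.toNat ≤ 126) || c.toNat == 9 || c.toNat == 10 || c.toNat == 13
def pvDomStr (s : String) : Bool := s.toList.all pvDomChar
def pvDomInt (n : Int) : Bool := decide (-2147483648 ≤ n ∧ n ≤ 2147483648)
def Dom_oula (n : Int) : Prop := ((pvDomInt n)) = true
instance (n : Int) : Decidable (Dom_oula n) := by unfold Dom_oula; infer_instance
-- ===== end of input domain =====

-- B replaces A's linear sieve (prime list + inner loop with i%j==0 break, str(i)[-1] digit test)
-- by a classic sieve of Eratosthenes (direct multiple-striking with a stepped range, i%10 digit test);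
-- the return values are proved equal for every n.

-- ===== PORT A =====
-- inner 'for j in prime' loop with its two breaks; hax[t] = False is Array.setIfInBounds
-- (every index written is in range, and Python raises on none of these inputs)
def oulaInner (n i : Int) : List Int → Array Bool → Array Bool
  | [], hax => hax
  | j :: js, hax =>
    let t := i * j
    if t > n then hax
    else
      let hax' := hax.setIfInBounds t.toNat false
      if PySem.Int.mod i j == 0 then hax'
      else oulaInner n i js hax'

-- one iteration of the outer 'for i in range(2, n+1)' loop
def oulaStep (n : Int) (st : Array Bool × List Int × List Int) (i : Int) :
    Array Bool × List Int × List Int :=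
  let hax := st.1
  let prime := st.2.1
  let ans := st.2.2
  if hax.getD i.toNat false then
    let prime' := prime ++ [i]
    let ans' := if (PySem.Str.pyGet? (PySem.Int.toStr i) (-1)) == some '1' then ans ++ [i] else ans
    let hax' := hax.setIfInBounds i.toNat false
    (oulaInner n i prime' hax', prime', ans')
  else
    (oulaInner n i prime hax, prime, ans)

def oula (n : Int) : List Int :=
  let hax := Array.replicate (n + 1).toNat true
  let st := (PySem.List.pyRange 2 (n + 1) 1).foldl (oulaStep n) (hax, [], [])
  st.2.2

-- ===== PORT B =====
-- 'for t in range(2*i, n+1, i): hax[t] = False'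
def oulaStrike (n i : Int) (hax : Array Bool) : Array Bool :=
  (PySem.List.pyRange (2 * i) (n + 1) i).foldl (fun h t => h.setIfInBounds t.toNat false) hax

def oulaAltStep (n : Int) (st : Array Bool × List Int) (i : Int) : Array Bool × List Int :=
  if st.1.getD i.toNat false then
    let ans' := if PySem.Int.mod i 10 == 1 then st.2 ++ [i] else st.2
    (oulaStrike n i st.1, ans')
  else st

def oula_alt (n : Int) : List Int :=
  let hax := Array.replicate (n + 1).toNat true
  let st := (PySem.List.pyRange 2 (n + 1) 1).foldl (oulaAltStep n) (hax, [])
  st.2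

-- ===== PRECONDITION & SPEC =====
def Spec_oula (n : Int) (out : List Int) : Prop := out = oula_alt n
instance (n : Int) (out : List Int) : Decidable (Spec_oula n out) := by unfold Spec_oula; infer_instance

-- ===== CLAIM (what is proved, stated in full; the proofs are below) =====
def Claim_equal_oula : Prop := ∀ (n : Int), Dom_oula n → Spec_oula n (oula n)

-- ===== LEMMAS AND PROOFS =====
-- list-level models of the two programs (the ports use Array Bool for speed; the
-- simulation lemmas below identify the two)
def oulaInnerL (n i : Int) : List Int → List Bool → List Bool
  | [], hax => hax
  | j :: js, hax =>
    let t := i * j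
    if t > n then hax
    else
      let hax' := PySem.List.pySetD hax t false
      if PySem.Int.mod i j == 0 then hax'
      else oulaInnerL n i js hax'

def oulaStepL (n : Int) (st : List Bool × List Int × List Int) (i : Int) :
    List Bool × List Int × List Int :=
  let hax := st.1
  let prime := st.2.1
  let ans := st.2.2
  if PySem.List.pyGetD hax i false then
    let prime' := prime ++ [i]
    let ans' := if (PySem.Str.pyGet? (PySem.Int.toStr i) (-1)) == some '1' then ans ++ [i] else ans
    let hax' := PySem.List.pySetD hax i false
    (oulaInnerL n i prime' hax', prime', ans')
  else
    (oulaInnerL n i prime hax, prime, ans)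

def oulaL (n : Int) : List Int :=
  let hax := List.replicate (n + 1).toNat true
  let st := (PySem.List.pyRange 2 (n + 1) 1).foldl (oulaStepL n) (hax, [], [])
  st.2.2


def oulaStrikeL (n i : Int) (hax : List Bool) : List Bool :=
  (PySem.List.pyRange (2 * i) (n + 1) i).foldl (fun h t => PySem.List.pySetD h t false) hax

def oulaAltStepL (n : Int) (st : List Bool × List Int) (i : Int) : List Bool × List Int :=
  if PySem.List.pyGetD st.1 i false then
    let ans' := if PySem.Int.mod i 10 == 1 then st.2 ++ [i] else st.2
    (oulaStrikeL n i st.1, ans')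
  else st

def oula_altL (n : Int) : List Int :=
  let hax := List.replicate (n + 1).toNat true
  let st := (PySem.List.pyRange 2 (n + 1) 1).foldl (oulaAltStepL n) (hax, [])
  st.2



theorem toDigitsCore_step (f n : ℕ) (ds : List Char) :
    Nat.toDigitsCore 10 (f+1) n ds =
      if n / 10 = 0 then (n % 10).digitChar :: ds
      else Nat.toDigitsCore 10 f (n / 10) ((n % 10).digitChar :: ds) := rfl

theorem toDigitsCore_suffix : ∀ (f n : ℕ) (ds : List Char),
    ∃ l, Nat.toDigitsCore 10 (f+1) n ds = l ++ (n % 10).digitChar :: ds := by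
  intro f
  induction f with
  | zero =>
    intro n ds
    rw [toDigitsCore_step]
    by_cases h : n / 10 = 0
    · exact ⟨[], by simp [h]⟩
    · exact ⟨[], by simp [h, Nat.toDigitsCore]⟩
  | succ f ih =>
    intro n ds
    rw [toDigitsCore_step]
    by_cases h : n / 10 = 0
    · exact ⟨[], by simp [h]⟩
    · obtain ⟨l, hl⟩ := ih (n / 10) ((n % 10).digitChar :: ds)
      exact ⟨l ++ [(n / 10 % 10).digitChar], by simp [h, hl]⟩

theorem digitChar_eq_one_iff (r : ℕ) (h : r < 10) : (r.digitChar = '1') ↔ r = 1 := by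
  interval_cases r <;> simp [Nat.digitChar]

theorem lastDigit (b : ℕ) :
    (PySem.Str.pyGet? (PySem.Int.toStr (b:Int)) (-1) == some '1') = decide (b % 10 = 1) := by
  have h1 : PySem.Str.pyGet? (PySem.Int.toStr (b:Int)) (-1)
      = (PySem.Int.toChars (b:Int)).getLast? := by
    simp [PySem.Str.pyGet?, PySem.Chars.pyGet?, PySem.Int.toList_toStr,
      PySem.List.pyGet?_neg_one]
  have h2 : PySem.Int.toChars (b:Int) = Nat.toDigits 10 b := by
    simp [PySem.Int.toChars]
  obtain ⟨l, hl⟩ := toDigitsCore_suffix b b []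
  rw [h1, h2, Nat.toDigits, hl]
  have : (l ++ [(b % 10).digitChar]).getLast? = some ((b % 10).digitChar) := by simp
  rw [this]
  by_cases hb : b % 10 = 1
  · simp [hb]
    decide
  · have : ¬ ((b % 10).digitChar = '1') := fun hc => hb ((digitChar_eq_one_iff _ (Nat.mod_lt _ (by norm_num))).mp hc)
    simp [hb]
    simpa using this




def setFalseFold (ts : List Int) (hax : List Bool) : List Bool :=
  ts.foldl (fun h t => PySem.List.pySetD h t false) hax

theorem pySetD_map_range {L : ℕ} (f : ℕ → Bool) (t : Int) (ht : 0 ≤ t) (v : Bool) :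
    PySem.List.pySetD ((List.range L).map f) t v
      = (List.range L).map (fun k : ℕ => if (k : Int) = t then v else f k) := by
  by_cases hl : t < (L : Int)
  · rw [PySem.List.pySetD_of_nonneg _ _ ht]
    apply List.ext_getElem
    · simp
    · intro i h1 h2
      simp only [List.getElem_set, List.getElem_map, List.getElem_range]
      simp only [List.length_set, List.length_map, List.length_range] at h1 h2
      by_cases hi : i = t.toNat
      · have hit : (i : Int) = t := by omega
        simp [hi, hit]
        omega
      · have hit : ¬ ((i : Int) = t) := by omega
        simp [hi, hit]
        omega
  · have hnone : PySem.List.pySet? ((List.range L).map f) t v = none := by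
      rw [PySem.List.pySet?_eq_none_iff]
      simp only [PySem.Raise.InRange, List.length_map, List.length_range]
      omega
    have : PySem.List.pySetD ((List.range L).map f) t v = (List.range L).map f := by
      simp [PySem.List.pySetD, hnone]
    rw [this]
    apply List.map_congr_left
    intro k hk
    simp only [List.mem_range] at hk
    have : ¬ ((k : Int) = t) := by omega
    simp [this]

theorem setFalseFold_map_range {L : ℕ} (ts : List Int) (f : ℕ → Bool)
    (h0 : ∀ t ∈ ts, 0 ≤ t) :
    setFalseFold ts ((List.range L).map f)
      = (List.range L).map (fun k : ℕ => f k && !decide ((k : Int) ∈ ts)) := by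
  induction ts generalizing f with
  | nil => simp [setFalseFold]
  | cons t ts ih =>
    have hstep : setFalseFold (t :: ts) ((List.range L).map f)
        = setFalseFold ts (PySem.List.pySetD ((List.range L).map f) t false) := rfl
    rw [hstep, pySetD_map_range f t (h0 t (by simp)) false,
      ih _ (fun x hx => h0 x (by simp [hx]))]
    apply List.map_congr_left
    intro k _
    by_cases h1 : (k : Int) = t <;> by_cases h2 : (k : Int) ∈ ts <;> simp [h1, h2]


def markA (b k : ℕ) : Bool :=
  decide ((Nat.Prime k ∧ k < b) ∨ (2 ≤ k ∧ ¬ Nat.Prime k ∧ k / k.minFac < b))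

def markB (b k : ℕ) : Bool :=
  decide (∃ p, p < b ∧ Nat.Prime p ∧ p ∣ k ∧ 2 * p ≤ k)

theorem comp_facts {k : ℕ} (h2 : 2 ≤ k) (hnp : ¬ Nat.Prime k) :
    k.minFac * k.minFac ≤ k ∧ 2 ≤ k.minFac ∧ 2 ≤ k / k.minFac ∧
      k / k.minFac < k ∧ (k / k.minFac) * k.minFac = k ∧ k.minFac ≤ k / k.minFac := by
  have hp : Nat.Prime k.minFac := Nat.minFac_prime (by omega)
  have h2f : 2 ≤ k.minFac := hp.two_le
  have hsq : k.minFac * k.minFac ≤ k := by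
    have := Nat.minFac_sq_le_self (by omega) hnp
    nlinarith [this, sq_nonneg k.minFac]
  have hdvd := Nat.minFac_dvd k
  have hmul : (k / k.minFac) * k.minFac = k := Nat.div_mul_cancel hdvd
  have hle : k.minFac ≤ k / k.minFac := (Nat.le_div_iff_mul_le (by omega)).mpr hsq
  have h2d : 2 ≤ k / k.minFac := le_trans h2f hle
  have hlt : k / k.minFac < k := Nat.div_lt_self (by omega) (by omega)
  exact ⟨hsq, h2f, h2d, hlt, hmul, hle⟩

theorem not_prime_mul' {a b : ℕ} (ha : 2 ≤ a) (hb : 2 ≤ b) : ¬ Nat.Prime (a * b) := by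
  intro hp
  rcases hp.eq_one_or_self_of_dvd a ⟨b, rfl⟩ with h | h
  · omega
  · nlinarith

theorem minFac_mul_eq {b j : ℕ} (hb : 2 ≤ b) (hj : Nat.Prime j) (hle : j ≤ b.minFac) :
    (b * j).minFac = j := by
  apply le_antisymm
  · exact Nat.minFac_le_of_dvd hj.two_le ⟨b, by ring⟩
  · have hq : Nat.Prime (b * j).minFac := Nat.minFac_prime (by nlinarith [hj.two_le])
    have hdvd : (b * j).minFac ∣ b * j := Nat.minFac_dvd _
    rcases (Nat.Prime.dvd_mul hq).mp hdvd with h | h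
    · exact le_trans hle (Nat.minFac_le_of_dvd hq.two_le h)
    · exact le_of_eq ((Nat.prime_dvd_prime_iff_eq hq hj).mp h).symm

theorem markA_succ {m b k : ℕ} (hb : 2 ≤ b) (hk : k ≤ m) :
    markA (b+1) k = true ↔
      (markA b k = true ∨ (Nat.Prime b ∧ k = b)
        ∨ (∃ j, Nat.Prime j ∧ j ≤ b.minFac ∧ k = b * j ∧ k ≤ m)) := by
  simp only [markA, decide_eq_true_eq]
  constructor
  · rintro (⟨hp, hlt⟩ | ⟨h2, hnp, hlt⟩)
    · by_cases h : k < b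
      · exact Or.inl (Or.inl ⟨hp, h⟩)
      · have : k = b := by omega
        exact Or.inr (Or.inl ⟨this ▸ hp, this⟩)
    · by_cases h : k / k.minFac < b
      · exact Or.inl (Or.inr ⟨h2, hnp, h⟩)
      · have hfacts := comp_facts h2 hnp
        have heq : k / k.minFac = b := by omega
        have hbdvd : b ∣ k := heq ▸ Nat.div_dvd_of_dvd (Nat.minFac_dvd k)
        have hmfb : b.minFac ∣ k := dvd_trans (Nat.minFac_dvd b) hbdvd
        refine Or.inr (Or.inr ⟨k.minFac, Nat.minFac_prime (by omega), ?_, ?_, hk⟩)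
        · exact Nat.minFac_le_of_dvd (Nat.minFac_prime (by omega)).two_le hmfb
        · rw [← heq]; exact (hfacts.2.2.2.2.1).symm
  · rintro (h | ⟨hpb, hkb⟩ | ⟨j, hj, hle, hkeq, hkm⟩)
    · rcases h with ⟨hp, hlt⟩ | ⟨h2, hnp, hlt⟩
      · exact Or.inl ⟨hp, by omega⟩
      · exact Or.inr ⟨h2, hnp, by omega⟩
    · exact Or.inl ⟨hkb ▸ hpb, by omega⟩
    · subst hkeq
      have hnp := not_prime_mul' hb hj.two_le
      have hmf := minFac_mul_eq hb hj hle
      refine Or.inr ⟨by nlinarith [hj.two_le], hnp, ?_⟩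
      have hdj : b * j / j = b := by
        rw [mul_comm]
        exact Nat.mul_div_cancel_left _ (by have := hj.two_le; omega)
      rw [hmf, hdj]
      omega

theorem markA_self {b : ℕ} (hb : 2 ≤ b) : markA b b = !decide (Nat.Prime b) := by
  by_cases hp : Nat.Prime b
  · have h : ¬ ((Nat.Prime b ∧ b < b) ∨ (2 ≤ b ∧ ¬ Nat.Prime b ∧ b / b.minFac < b)) := by
      rintro (⟨-, h⟩ | ⟨-, hnp, -⟩)
      · omega
      · exact hnp hp
    simp only [markA, decide_eq_false_iff_not]
    simpa [hp] using h
  · have hfacts := comp_facts hb hp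
    simp only [markA, decide_eq_false hp, Bool.not_false, decide_eq_true_eq]
    exact Or.inr ⟨hb, hp, hfacts.2.2.2.1⟩

theorem markB_self {b : ℕ} (hb : 2 ≤ b) : markB b b = !decide (Nat.Prime b) := by
  by_cases hp : Nat.Prime b
  · have h : ¬ (∃ p, p < b ∧ Nat.Prime p ∧ p ∣ b ∧ 2 * p ≤ b) := by
      rintro ⟨p, hlt, hpp, hdvd, -⟩
      rcases hp.eq_one_or_self_of_dvd p hdvd with h | h
      · exact absurd h (by have := hpp.two_le; omega)
      · omega
    simp [markB, h, hp]
  · have hfacts := comp_facts hb hp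
    have hlt : b.minFac < b := by
      have h1 := Nat.minFac_le (show 0 < b by omega)
      rcases lt_or_eq_of_le h1 with h | h
      · exact h
      · exact absurd (h ▸ Nat.minFac_prime (by omega : b ≠ 1)) hp
    have h : (∃ p, p < b ∧ Nat.Prime p ∧ p ∣ b ∧ 2 * p ≤ b) :=
      ⟨b.minFac, hlt, Nat.minFac_prime (by omega), Nat.minFac_dvd b, by nlinarith⟩
    simp [markB, h, hp]

theorem markB_succ {b k : ℕ} :
    markB (b+1) k = true ↔
      (markB b k = true ∨ (Nat.Prime b ∧ b ∣ k ∧ 2 * b ≤ k)) := by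
  simp only [markB, decide_eq_true_eq]
  constructor
  · rintro ⟨p, hlt, hpp, hdvd, hle⟩
    by_cases h : p < b
    · exact Or.inl ⟨p, h, hpp, hdvd, hle⟩
    · have : p = b := by omega
      subst this
      exact Or.inr ⟨hpp, hdvd, hle⟩
  · rintro (⟨p, hlt, hpp, hdvd, hle⟩ | ⟨hpb, hdvd, hle⟩)
    · exact ⟨p, by omega, hpp, hdvd, hle⟩
    · exact ⟨b, by omega, hpb, hdvd, hle⟩

theorem setFalseFold_cons (t : Int) (ts : List Int) (hax : List Bool) :
    setFalseFold (t :: ts) hax = setFalseFold ts (PySem.List.pySetD hax t false) := rfl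

def innerMarksN (m b : ℕ) : List ℕ → List ℕ
  | [] => []
  | j :: js => if m < b * j then [] else if b % j = 0 then [b * j] else b * j :: innerMarksN m b js

theorem oulaInner_cast (m b : ℕ) (psN : List ℕ) (hps : ∀ j ∈ psN, 0 < j) :
    ∀ hax, oulaInnerL (m : Int) (b : Int) (psN.map (fun j : ℕ => (j : Int))) hax
      = setFalseFold ((innerMarksN m b psN).map (fun j : ℕ => (j : Int))) hax := by
  induction psN with
  | nil => intro hax; rfl
  | cons j js ih =>
    intro hax
    have hj : 0 < j := hps j (by simp)
    have hcast : (b : Int) * (j : Int) = ((b * j : ℕ) : Int) := by push_cast; ring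
    by_cases hgt : m < b * j
    · have : ((b : Int) * (j : Int) > (m : Int)) := by rw [hcast]; exact_mod_cast hgt
      simp only [oulaInnerL, List.map_cons, innerMarksN, if_pos hgt]
      rw [if_pos this]
      rfl
    · have hngt : ¬ ((b : Int) * (j : Int) > (m : Int)) := by
        rw [hcast]; push_cast; omega
      have hmod : PySem.Int.mod (b : Int) (j : Int) = ((b % j : ℕ) : Int) :=
        PySem.Int.mod_natCast b j
      by_cases hdvd : b % j = 0
      · simp only [oulaInnerL, List.map_cons, innerMarksN, if_neg hgt, if_pos hdvd]
        rw [if_neg hngt]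
        have : (PySem.Int.mod (↑b) (↑j) == 0) = true := by
          rw [hmod, hdvd]; rfl
        rw [this, if_pos rfl]
        simp only [List.map_cons, List.map_nil, List.foldl_cons, List.foldl_nil, setFalseFold]
        rw [hcast]
      · simp only [oulaInnerL, List.map_cons, innerMarksN, if_neg hgt, if_neg hdvd]
        rw [if_neg hngt]
        have : (PySem.Int.mod (↑b) (↑j) == 0) = false := by
          rw [hmod, beq_eq_false_iff_ne]
          exact_mod_cast hdvd
        rw [this, if_neg (by simp)]
        rw [ih (fun x hx => hps x (by simp [hx]))]
        simp only [List.map_cons, setFalseFold_cons]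
        rw [hcast]

theorem innerMarksN_mem_aux (m b : ℕ) (hb : 2 ≤ b) :
    ∀ (qs P₂ : List ℕ), (∀ j ∈ qs, Nat.Prime j ∧ j < b.minFac) → qs.Pairwise (· < ·) →
    ∀ k, (k ∈ innerMarksN m b (qs ++ b.minFac :: P₂)
      ↔ ∃ j, (j ∈ qs ∨ j = b.minFac) ∧ k = b * j ∧ b * j ≤ m) := by
  intro qs
  induction qs with
  | nil =>
    intro P₂ _ _ k
    have hdvd : b % b.minFac = 0 := Nat.dvd_iff_mod_eq_zero.mp (Nat.minFac_dvd b)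
    simp only [List.nil_append, innerMarksN]
    by_cases hgt : m < b * b.minFac
    · rw [if_pos hgt]
      simp only [List.not_mem_nil, false_iff]
      rintro ⟨j, (hj | rfl), rfl, hle⟩
      · simp at hj
      · omega
    · rw [if_neg hgt, if_pos hdvd]
      simp only [List.mem_cons, List.not_mem_nil, or_false]
      constructor
      · rintro rfl
        exact ⟨b.minFac, Or.inr rfl, rfl, by omega⟩
      · rintro ⟨j, (hj | rfl), rfl, hle⟩
        · simp at hj
        · rfl
  | cons j₀ qs' ih =>
    intro P₂ hq hpw k
    have hj₀ := hq j₀ (by simp)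
    have hnd : b % j₀ ≠ 0 := by
      intro h
      have : b.minFac ≤ j₀ :=
        Nat.minFac_le_of_dvd hj₀.1.two_le (Nat.dvd_iff_mod_eq_zero.mpr h)
      omega
    simp only [List.cons_append, innerMarksN]
    by_cases hgt : m < b * j₀
    · rw [if_pos hgt]
      simp only [List.not_mem_nil, false_iff]
      rintro ⟨j, hj, hk, hle⟩
      have hj₀le : j₀ ≤ j := by
        rcases hj with hj | rfl
        · rcases List.mem_cons.mp hj with rfl | hmem
          · exact le_refl _
          · exact le_of_lt (List.rel_of_pairwise_cons hpw hmem)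
        · exact le_of_lt hj₀.2
      have : b * j₀ ≤ b * j := Nat.mul_le_mul_left b hj₀le
      omega
    · rw [if_neg hgt, if_neg hnd]
      have ih' := ih P₂ (fun x hx => hq x (by simp [hx])) (List.Pairwise.of_cons hpw)
      rw [List.mem_cons, ih' k]
      constructor
      · rintro (rfl | ⟨j, hj, rfl, hle⟩)
        · exact ⟨j₀, Or.inl (by simp), rfl, by omega⟩
        · refine ⟨j, ?_, rfl, hle⟩
          rcases hj with h | h
          · exact Or.inl (List.mem_cons.mpr (Or.inr h))
          · exact Or.inr h
      · rintro ⟨j, hj, rfl, hle⟩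
        rcases hj with hj | rfl
        · rcases List.mem_cons.mp hj with rfl | hmem
          · exact Or.inl rfl
          · exact Or.inr ⟨j, Or.inl hmem, rfl, hle⟩
        · exact Or.inr ⟨b.minFac, Or.inr rfl, rfl, hle⟩

theorem primes_filter_split (b : ℕ) (hb : 2 ≤ b) :
    ∃ P₂, (List.range (b+1)).filter (fun p => decide (Nat.Prime p))
      = ((List.range b.minFac).filter (fun p => decide (Nat.Prime p))) ++ b.minFac :: P₂ := by
  have hple : b.minFac ≤ b := Nat.minFac_le (by omega)
  have hsplit : b + 1 = b.minFac + (b + 1 - b.minFac) := by omega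
  have h1 : List.range (b+1)
      = List.range b.minFac ++ (List.range (b + 1 - b.minFac)).map (fun x => b.minFac + x) := by
    conv_lhs => rw [hsplit, List.range_add]
  have h2 : b + 1 - b.minFac = (b - b.minFac) + 1 := by omega
  have h3 : (List.range (b + 1 - b.minFac)).map (fun x => b.minFac + x)
      = b.minFac :: (List.range (b - b.minFac)).map (fun x => b.minFac + (x + 1)) := by
    rw [h2, List.range_succ_eq_map]
    simp [List.map_map, Function.comp]
  refine ⟨((List.range (b - b.minFac)).map (fun x => b.minFac + (x + 1))).filter
    (fun p => decide (Nat.Prime p)), ?_⟩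
  rw [h1, List.filter_append, h3]
  congr 1
  rw [List.filter_cons]
  simp [Nat.minFac_prime (show b ≠ 1 by omega)]

theorem innerMarksN_mem (m b : ℕ) (hb : 2 ≤ b) (k : ℕ) :
    k ∈ innerMarksN m b ((List.range (b+1)).filter (fun p => decide (Nat.Prime p)))
      ↔ ∃ j, Nat.Prime j ∧ j ≤ b.minFac ∧ k = b * j ∧ b * j ≤ m := by
  obtain ⟨P₂, hP⟩ := primes_filter_split b hb
  have hq : ∀ j ∈ (List.range b.minFac).filter (fun p => decide (Nat.Prime p)),
      Nat.Prime j ∧ j < b.minFac := by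
    intro j hj
    simp only [List.mem_filter, List.mem_range, decide_eq_true_eq] at hj
    exact ⟨hj.2, hj.1⟩
  have hpw : ((List.range b.minFac).filter (fun p => decide (Nat.Prime p))).Pairwise (· < ·) :=
    List.Pairwise.sublist List.filter_sublist List.pairwise_lt_range
  rw [hP, innerMarksN_mem_aux m b hb _ P₂ hq hpw k]
  constructor
  · rintro ⟨j, hj, rfl, hle⟩
    rcases hj with hj | rfl
    · exact ⟨j, (hq j hj).1, le_of_lt (hq j hj).2, rfl, hle⟩
    · exact ⟨b.minFac, Nat.minFac_prime (by omega), le_refl _, rfl, hle⟩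
  · rintro ⟨j, hpj, hle, rfl, hlem⟩
    rcases lt_or_eq_of_le hle with h | heq
    · exact ⟨j, Or.inl (by simp [List.mem_filter, List.mem_range, h, hpj]), rfl, hlem⟩
    · exact ⟨j, Or.inr heq, rfl, hlem⟩


def primesI (b : ℕ) : List Int :=
  ((List.range b).filter (fun p => decide (Nat.Prime p))).map (fun j : ℕ => (j : Int))

def ansI (b : ℕ) : List Int :=
  ((List.range b).filter (fun p => decide (Nat.Prime p) && decide (p % 10 = 1))).map (fun j : ℕ => (j : Int))

theorem primesI_succ (b : ℕ) :
    primesI (b+1) = if Nat.Prime b then primesI b ++ [(b : Int)] else primesI b := by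
  unfold primesI
  rw [List.range_succ, List.filter_append, List.filter_cons]
  by_cases hp : Nat.Prime b <;> simp [hp]

theorem ansI_succ (b : ℕ) :
    ansI (b+1) = if Nat.Prime b ∧ b % 10 = 1 then ansI b ++ [(b : Int)] else ansI b := by
  unfold ansI
  rw [List.range_succ, List.filter_append, List.filter_cons]
  by_cases hp : Nat.Prime b <;> by_cases hd : b % 10 = 1 <;>
    simp [hp, hd]

theorem primesI_two : primesI 2 = [] := by decide
theorem ansI_two : ansI 2 = [] := by decide


def haxA (m b : ℕ) : List Bool := (List.range (m+1)).map (fun k => !markA b k)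
def haxB (m b : ℕ) : List Bool := (List.range (m+1)).map (fun k => !markB b k)

theorem pyGetD_map_range' {L : ℕ} (f : ℕ → Bool) (b : ℕ) (hb : b < L) :
    PySem.List.pyGetD ((List.range L).map f) ((b : ℕ) : Int) false = f b := by
  rw [PySem.List.pyGetD_natCast, PySem.List.getD_map_range f L b false hb]

theorem mem_map_natCast (k : ℕ) (l : List ℕ) :
    (((k : ℕ) : Int) ∈ l.map (fun j : ℕ => (j : Int))) ↔ k ∈ l := by
  constructor
  · intro h
    obtain ⟨x, hx, he⟩ := List.mem_map.mp h
    have : x = k := by exact_mod_cast he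
    exact this ▸ hx
  · intro h
    exact List.mem_map.mpr ⟨k, h, rfl⟩

theorem primes_pos (b : ℕ) :
    ∀ j ∈ (List.range b).filter (fun p => decide (Nat.Prime p)), 0 < j := by
  intro j hj
  simp only [List.mem_filter, decide_eq_true_eq] at hj
  exact hj.2.pos

-- primes below b+1 = primes below b, plus b if prime
theorem primes_filter_succ_of_prime {b : ℕ} (hp : Nat.Prime b) :
    (List.range (b+1)).filter (fun p => decide (Nat.Prime p))
      = (List.range b).filter (fun p => decide (Nat.Prime p)) ++ [b] := by
  rw [List.range_succ, List.filter_append, List.filter_cons]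
  simp [hp]

theorem primes_filter_succ_of_not_prime {b : ℕ} (hp : ¬ Nat.Prime b) :
    (List.range (b+1)).filter (fun p => decide (Nat.Prime p))
      = (List.range b).filter (fun p => decide (Nat.Prime p)) := by
  rw [List.range_succ, List.filter_append, List.filter_cons]
  simp [hp]

theorem markA_succ_bool {m b k : ℕ} (hb : 2 ≤ b) (hk : k ≤ m) :
    markA (b+1) k
      = (markA b k || (decide (Nat.Prime b) && decide (k = b))
          || decide (k ∈ innerMarksN m b
              ((List.range (b+1)).filter (fun p => decide (Nat.Prime p))))) := by
  rw [Bool.eq_iff_iff]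
  simp only [Bool.or_eq_true, Bool.and_eq_true, decide_eq_true_eq]
  rw [markA_succ hb hk, innerMarksN_mem m b hb k]
  constructor
  · rintro (h | ⟨h1, h2⟩ | ⟨j, h1, h2, rfl, h4⟩)
    · exact Or.inl (Or.inl h)
    · exact Or.inl (Or.inr ⟨h1, h2⟩)
    · exact Or.inr ⟨j, h1, h2, rfl, h4⟩
  · rintro ((h | ⟨h1, h2⟩) | ⟨j, h1, h2, rfl, h4⟩)
    · exact Or.inl h
    · exact Or.inr (Or.inl ⟨h1, h2⟩)
    · exact Or.inr (Or.inr ⟨j, h1, h2, rfl, h4⟩)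

theorem stepA (m b : ℕ) (hb : 2 ≤ b) (hbm : b ≤ m) :
    oulaStepL (m : Int) (haxA m b, primesI b, ansI b) ((b : ℕ) : Int)
      = (haxA m (b+1), primesI (b+1), ansI (b+1)) := by
  have hbL : b < m + 1 := by omega
  have hread : PySem.List.pyGetD (haxA m b) ((b : ℕ) : Int) false = decide (Nat.Prime b) := by
    rw [haxA, pyGetD_map_range' _ b hbL, markA_self hb]
    simp
  have hnonneg : ∀ t ∈ (innerMarksN m b
      ((List.range (b+1)).filter (fun p => decide (Nat.Prime p)))).map (fun j : ℕ => (j : Int)),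
      (0 : Int) ≤ t := by
    intro t ht
    obtain ⟨x, -, rfl⟩ := List.mem_map.mp ht
    positivity
  have hinner := oulaInner_cast m b
    ((List.range (b+1)).filter (fun p => decide (Nat.Prime p))) (primes_pos (b+1))
  by_cases hp : Nat.Prime b
  · have hread' : PySem.List.pyGetD (haxA m b) ((b : ℕ) : Int) false = true := by
      rw [hread]; simp [hp]
    have hprime' : primesI b ++ [((b : ℕ) : Int)] = primesI (b+1) := by
      rw [primesI_succ, if_pos hp]
    have hans' :
        (if (PySem.Str.pyGet? (PySem.Int.toStr ((b : ℕ) : Int)) (-1)) == some '1'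
          then ansI b ++ [((b : ℕ) : Int)] else ansI b) = ansI (b+1) := by
      rw [lastDigit b, ansI_succ]
      by_cases hd : b % 10 = 1
      · rw [if_pos (by simp [hd]), if_pos ⟨hp, hd⟩]
      · rw [if_neg (by simp [hd]), if_neg (by tauto)]
    have hmid : PySem.List.pySetD (haxA m b) ((b : ℕ) : Int) false
        = (List.range (m+1)).map (fun k => !(markA b k || decide (k = b))) := by
      rw [haxA, pySetD_map_range _ _ (by positivity) false]
      apply List.map_congr_left
      intro k hk
      by_cases hkb : k = b
      · simp [hkb]
      · have : ¬ ((k : Int) = ((b : ℕ) : Int)) := by exact_mod_cast hkb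
        simp [this, hkb]
    have hps : primesI b ++ [((b : ℕ) : Int)]
        = ((List.range (b+1)).filter (fun p => decide (Nat.Prime p))).map (fun j : ℕ => (j : Int)) := by
      rw [primes_filter_succ_of_prime hp]
      simp [primesI]
    simp only [oulaStepL]
    rw [hread']
    simp only [if_true]
    rw [hmid, hps, hinner, setFalseFold_map_range _ _ hnonneg]
    simp only [Prod.mk.injEq]
    refine ⟨?_, rfl, hans'⟩
    apply List.map_congr_left
    intro k hk
    simp only [List.mem_range] at hk
    rw [show (decide ((k : Int) ∈ (innerMarksN m b
          ((List.range (b+1)).filter (fun p => decide (Nat.Prime p)))).map (fun j : ℕ => (j : Int))))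
        = decide (k ∈ innerMarksN m b
          ((List.range (b+1)).filter (fun p => decide (Nat.Prime p)))) from
        decide_eq_decide.mpr (mem_map_natCast _ _),
      markA_succ_bool hb (show k ≤ m by omega)]
    simp [hp, Bool.not_or]
  · have hread' : PySem.List.pyGetD (haxA m b) ((b : ℕ) : Int) false = false := by
      rw [hread]; simp [hp]
    have hps0 : primesI b
        = ((List.range (b+1)).filter (fun p => decide (Nat.Prime p))).map (fun j : ℕ => (j : Int)) := by
      rw [primes_filter_succ_of_not_prime hp]; rfl
    simp only [oulaStepL]
    rw [hread']
    rw [if_neg (by simp)]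
    rw [show haxA m b = (List.range (m+1)).map (fun k => !markA b k) from rfl]
    rw [hps0, hinner, setFalseFold_map_range _ _ hnonneg]
    simp only [Prod.mk.injEq]
    refine ⟨?_, rfl, ?_⟩
    · apply List.map_congr_left
      intro k hk
      simp only [List.mem_range] at hk
      rw [show (decide ((k : Int) ∈ (innerMarksN m b
            ((List.range (b+1)).filter (fun p => decide (Nat.Prime p)))).map (fun j : ℕ => (j : Int))))
          = decide (k ∈ innerMarksN m b
            ((List.range (b+1)).filter (fun p => decide (Nat.Prime p)))) from
          decide_eq_decide.mpr (mem_map_natCast _ _),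
        markA_succ_bool hb (show k ≤ m by omega)]
      simp [hp, Bool.not_or]
    · rw [ansI_succ, if_neg (by tauto)]

theorem strike_mem (m b k : ℕ) (hb : 2 ≤ b) :
    (((k : ℕ) : Int) ∈ PySem.List.pyRange (2 * (b : Int)) ((m : Int) + 1) (b : Int))
      ↔ (b ∣ k ∧ 2 * b ≤ k ∧ k ≤ m) := by
  rw [PySem.List.mem_pyRange_iff_of_pos (by exact_mod_cast (by omega : 0 < b))]
  have hd2 : (b : Int) ∣ 2 * (b : Int) := dvd_mul_left _ _
  constructor
  · rintro ⟨h1, h2, h3⟩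
    have hdk : (b : Int) ∣ (k : Int) := by
      have := dvd_add h3 hd2
      simpa using this
    exact ⟨Int.natCast_dvd_natCast.mp hdk, by exact_mod_cast h1, by omega⟩
  · rintro ⟨h1, h2, h3⟩
    refine ⟨by exact_mod_cast h2, by omega, ?_⟩
    exact dvd_sub (Int.natCast_dvd_natCast.mpr h1) hd2

theorem markB_succ_bool {m b k : ℕ} (hb : 2 ≤ b) (hk : k ≤ m) :
    markB (b+1) k
      = (markB b k || (decide (Nat.Prime b)
          && decide (((k : ℕ) : Int) ∈ PySem.List.pyRange (2 * (b : Int)) ((m : Int) + 1) (b : Int)))) := by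
  rw [Bool.eq_iff_iff]
  simp only [Bool.or_eq_true, Bool.and_eq_true, decide_eq_true_eq]
  rw [markB_succ, strike_mem m b k hb]
  constructor
  · rintro (h | ⟨h1, h2, h3⟩)
    · exact Or.inl h
    · exact Or.inr ⟨h1, h2, h3, hk⟩
  · rintro (h | ⟨h1, h2, h3, -⟩)
    · exact Or.inl h
    · exact Or.inr ⟨h1, h2, h3⟩

theorem markB_two (k : ℕ) : markB 2 k = false := by
  simp only [markB, decide_eq_false_iff_not]
  rintro ⟨p, hlt, hpp, -, -⟩
  have := hpp.two_le
  omega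

theorem markA_two (k : ℕ) : markA 2 k = false := by
  simp only [markA, decide_eq_false_iff_not]
  rintro (⟨hp, hlt⟩ | ⟨h2, hnp, hlt⟩)
  · have := hp.two_le; omega
  · have := (comp_facts h2 hnp).2.2.1; omega

theorem haxA_init (m : ℕ) : haxA m 2 = List.replicate (m+1) true := by
  rw [List.eq_replicate_iff]
  constructor
  · simp [haxA]
  · intro x hx
    obtain ⟨k, -, rfl⟩ := List.mem_map.mp hx
    rw [markA_two]
    rfl

theorem haxB_init (m : ℕ) : haxB m 2 = List.replicate (m+1) true := by
  rw [List.eq_replicate_iff]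
  constructor
  · simp [haxB]
  · intro x hx
    obtain ⟨k, -, rfl⟩ := List.mem_map.mp hx
    rw [markB_two]
    rfl

theorem stepB (m b : ℕ) (hb : 2 ≤ b) (hbm : b ≤ m) :
    oulaAltStepL (m : Int) (haxB m b, ansI b) ((b : ℕ) : Int) = (haxB m (b+1), ansI (b+1)) := by
  have hbL : b < m + 1 := by omega
  have hread : PySem.List.pyGetD (haxB m b) ((b : ℕ) : Int) false = decide (Nat.Prime b) := by
    rw [haxB, pyGetD_map_range' _ b hbL, markB_self hb]
    simp
  have hnonneg : ∀ t ∈ PySem.List.pyRange (2 * (b : Int)) ((m : Int) + 1) (b : Int), (0 : Int) ≤ t := by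
    intro t ht
    rw [PySem.List.mem_pyRange_iff_of_pos (by exact_mod_cast (by omega : 0 < b))] at ht
    have := ht.1
    omega
  by_cases hp : Nat.Prime b
  · have hread' : PySem.List.pyGetD (haxB m b) ((b : ℕ) : Int) false = true := by
      rw [hread]; simp [hp]
    have hans' : (if PySem.Int.mod ((b : ℕ) : Int) 10 == 1 then ansI b ++ [((b : ℕ) : Int)] else ansI b)
        = ansI (b+1) := by
      have hmod : PySem.Int.mod ((b : ℕ) : Int) 10 = ((b % 10 : ℕ) : Int) := by
        rw [show (10 : Int) = ((10 : ℕ) : Int) from rfl, PySem.Int.mod_natCast]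
      rw [hmod, ansI_succ]
      by_cases hd : b % 10 = 1
      · rw [if_pos (by rw [hd]; rfl), if_pos ⟨hp, hd⟩]
      · rw [if_neg (by simpa using (by exact_mod_cast hd : ¬ ((b % 10 : ℕ) : Int) = 1)),
          if_neg (by tauto)]
    simp only [oulaAltStepL]
    rw [hread']
    simp only [if_true]
    rw [show oulaStrikeL (m : Int) ((b : ℕ) : Int) (haxB m b)
        = setFalseFold (PySem.List.pyRange (2 * (b : Int)) ((m : Int) + 1) (b : Int)) (haxB m b) from rfl]
    rw [show haxB m b = (List.range (m+1)).map (fun k => !markB b k) from rfl]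
    rw [setFalseFold_map_range _ _ hnonneg]
    simp only [Prod.mk.injEq]
    refine ⟨?_, hans'⟩
    apply List.map_congr_left
    intro k hk
    simp only [List.mem_range] at hk
    rw [markB_succ_bool hb (show k ≤ m by omega)]
    simp [hp, Bool.not_or]
  · have hread' : PySem.List.pyGetD (haxB m b) ((b : ℕ) : Int) false = false := by
      rw [hread]; simp [hp]
    simp only [oulaAltStepL]
    rw [hread']
    rw [if_neg (by simp)]
    simp only [Prod.mk.injEq]
    constructor
    · apply List.map_congr_left
      intro k hk
      simp only [List.mem_range] at hk
      rw [markB_succ_bool hb (show k ≤ m by omega)]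
      simp [hp]
    · rw [ansI_succ, if_neg (by tauto)]

theorem foldA (m : ℕ) : ∀ c, 2 ≤ c → c ≤ m + 1 →
    (PySem.List.pyRange 2 ((c : ℕ) : Int) 1).foldl (oulaStepL (m : Int))
        (haxA m 2, primesI 2, ansI 2)
      = (haxA m c, primesI c, ansI c) := by
  intro c hc2
  induction c, hc2 using Nat.le_induction with
  | base =>
    intro _
    rw [show ((2 : ℕ) : Int) = 2 from rfl, PySem.List.pyRange_one_eq_nil (le_refl 2)]
    rfl
  | succ c hc ih =>
    intro hcm
    have h1 : ((c + 1 : ℕ) : Int) = ((c : ℕ) : Int) + 1 := by push_cast; ring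
    rw [h1, PySem.List.pyRange_one_succ_right (by exact_mod_cast hc), List.foldl_append,
      ih (by omega)]
    exact stepA m c hc (by omega)

theorem foldB (m : ℕ) : ∀ c, 2 ≤ c → c ≤ m + 1 →
    (PySem.List.pyRange 2 ((c : ℕ) : Int) 1).foldl (oulaAltStepL (m : Int)) (haxB m 2, ansI 2)
      = (haxB m c, ansI c) := by
  intro c hc2
  induction c, hc2 using Nat.le_induction with
  | base =>
    intro _
    rw [show ((2 : ℕ) : Int) = 2 from rfl, PySem.List.pyRange_one_eq_nil (le_refl 2)]
    rfl
  | succ c hc ih =>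
    intro hcm
    have h1 : ((c + 1 : ℕ) : Int) = ((c : ℕ) : Int) + 1 := by push_cast; ring
    rw [h1, PySem.List.pyRange_one_succ_right (by exact_mod_cast hc), List.foldl_append,
      ih (by omega)]
    exact stepB m c hc (by omega)

theorem oulaLA_eq (n : Int) (hn : 2 ≤ n) : oulaL n = ansI ((n + 1).toNat) := by
  have hm : n = ((n.toNat : ℕ) : Int) := by omega
  have hm1 : (n + 1).toNat = n.toNat + 1 := by omega
  have hrep : (n + 1).toNat = n.toNat + 1 := hm1
  show ((PySem.List.pyRange 2 (n + 1) 1).foldl (oulaStepL n)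
    (List.replicate (n + 1).toNat true, [], [])).2.2 = _
  rw [hrep,
    show ((List.replicate (n.toNat + 1) true : List Bool), ([] : List Int), ([] : List Int))
      = (haxA n.toNat 2, primesI 2, ansI 2) by rw [haxA_init, primesI_two, ansI_two]]
  rw [show (n + 1) = ((n.toNat + 1 : ℕ) : Int) by omega,
    show n = ((n.toNat : ℕ) : Int) from hm,
    Int.toNat_natCast]
  rw [foldA n.toNat (n.toNat + 1) (by omega) (by omega)]

theorem oulaLB_eq (n : Int) (hn : 2 ≤ n) : oula_altL n = ansI ((n + 1).toNat) := by
  have hm : n = ((n.toNat : ℕ) : Int) := by omega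
  have hrep : (n + 1).toNat = n.toNat + 1 := by omega
  show ((PySem.List.pyRange 2 (n + 1) 1).foldl (oulaAltStepL n)
    (List.replicate (n + 1).toNat true, [])).2 = _
  rw [hrep,
    show ((List.replicate (n.toNat + 1) true : List Bool), ([] : List Int))
      = (haxB n.toNat 2, ansI 2) by rw [haxB_init, ansI_two]]
  rw [show (n + 1) = ((n.toNat + 1 : ℕ) : Int) by omega,
    show n = ((n.toNat : ℕ) : Int) from hm,
    Int.toNat_natCast]
  rw [foldB n.toNat (n.toNat + 1) (by omega) (by omega)]

theorem oulaL_eq_altL (n : Int) : oulaL n = oula_altL n := by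
  by_cases hn : n ≤ 1
  · show ((PySem.List.pyRange 2 (n + 1) 1).foldl (oulaStepL n)
      (List.replicate (n + 1).toNat true, [], [])).2.2
      = ((PySem.List.pyRange 2 (n + 1) 1).foldl (oulaAltStepL n)
      (List.replicate (n + 1).toNat true, [])).2
    rw [PySem.List.pyRange_one_eq_nil (by omega)]
    rfl
  · rw [oulaLA_eq n (by omega), oulaLB_eq n (by omega)]

-- ===== Array/List simulation =====
theorem agetd (l : List Bool) (i : ℕ) : (l.toArray.getD i false) = l.getD i false := by
  unfold Array.getD
  split
  · rename_i h
    rw [List.getD_eq_getElem l false (by simpa using h)]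
    rfl
  · rename_i h
    rw [List.getD_eq_default l false (by simpa using h)]

theorem agetd' (l : List Bool) (i : Int) (hi : 0 ≤ i) :
    (l.toArray.getD i.toNat false) = PySem.List.pyGetD l i false := by
  rw [PySem.List.pyGetD_of_nonneg _ _ hi, agetd]

theorem asetd (l : List Bool) (i : Int) (hi : 0 ≤ i) (v : Bool) :
    (l.toArray.setIfInBounds i.toNat v) = (PySem.List.pySetD l i v).toArray := by
  apply Array.toList_inj.mp
  rw [PySem.List.pySetD_of_nonneg _ _ hi, Array.toList_setIfInBounds]

theorem innerSim (n i : Int) (hi : 0 ≤ i) : ∀ (ps : List Int) (l : List Bool),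
    (∀ j ∈ ps, 0 ≤ j) → oulaInner n i ps l.toArray = (oulaInnerL n i ps l).toArray := by
  intro ps
  induction ps with
  | nil => intro l _; rfl
  | cons j js ih =>
    intro l hps
    have hj : 0 ≤ j := hps j (by simp)
    have ht : 0 ≤ i * j := mul_nonneg hi hj
    show (if i * j > n then l.toArray
      else if PySem.Int.mod i j == 0 then l.toArray.setIfInBounds (i*j).toNat false
      else oulaInner n i js (l.toArray.setIfInBounds (i*j).toNat false)) = _
    rw [show oulaInnerL n i (j :: js) l = (if i * j > n then l
      else if PySem.Int.mod i j == 0 then PySem.List.pySetD l (i*j) false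
      else oulaInnerL n i js (PySem.List.pySetD l (i*j) false)) from rfl]
    by_cases h1 : i * j > n
    · rw [if_pos h1, if_pos h1]
    · rw [if_neg h1, if_neg h1, asetd l _ ht]
      by_cases h2 : PySem.Int.mod i j == 0
      · rw [if_pos h2, if_pos h2]
      · rw [if_neg h2, if_neg h2, ih _ (fun x hx => hps x (by simp [hx]))]

theorem stepSimA (n : Int) (l : List Bool) (pr ans : List Int) (i : Int) (hi : 0 ≤ i)
    (hpr : ∀ j ∈ pr, 0 ≤ j) :
    oulaStep n (l.toArray, pr, ans) i
      = ((oulaStepL n (l, pr, ans) i).1.toArray, (oulaStepL n (l, pr, ans) i).2) := by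
  show (if l.toArray.getD i.toNat false then _ else _) = _
  rw [agetd' l i hi]
  rw [show oulaStepL n (l, pr, ans) i = (if PySem.List.pyGetD l i false then
      (oulaInnerL n i (pr ++ [i]) (PySem.List.pySetD l i false), pr ++ [i],
        if (PySem.Str.pyGet? (PySem.Int.toStr i) (-1)) == some '1' then ans ++ [i] else ans)
    else (oulaInnerL n i pr l, pr, ans)) from rfl]
  by_cases h : PySem.List.pyGetD l i false
  · rw [if_pos h, if_pos h]
    rw [asetd l i hi, innerSim n i hi _ _ (by
      intro x hx
      rcases List.mem_append.mp hx with h' | h'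
      · exact hpr x h'
      · simp only [List.mem_singleton] at h'; omega)]
  · rw [if_neg h, if_neg h]
    rw [innerSim n i hi _ _ hpr]

theorem foldSimA (n : Int) : ∀ (rng : List Int), (∀ x ∈ rng, 0 ≤ x) →
    ∀ (l : List Bool) (pr ans : List Int), (∀ j ∈ pr, 0 ≤ j) →
    rng.foldl (oulaStep n) (l.toArray, pr, ans)
      = ((rng.foldl (oulaStepL n) (l, pr, ans)).1.toArray,
          (rng.foldl (oulaStepL n) (l, pr, ans)).2) := by
  intro rng
  induction rng with
  | nil => intro _ l pr ans _; rfl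
  | cons x rng ih =>
    intro hrng l pr ans hpr
    have hx : 0 ≤ x := hrng x (by simp)
    simp only [List.foldl_cons]
    rw [stepSimA n l pr ans x hx hpr]
    have hpr' : ∀ j ∈ (oulaStepL n (l, pr, ans) x).2.1, 0 ≤ j := by
      show ∀ j ∈ (oulaStepL n (l, pr, ans) x).2.1, 0 ≤ j
      rw [show oulaStepL n (l, pr, ans) x = (if PySem.List.pyGetD l x false then
          (oulaInnerL n x (pr ++ [x]) (PySem.List.pySetD l x false), pr ++ [x],
            if (PySem.Str.pyGet? (PySem.Int.toStr x) (-1)) == some '1' then ans ++ [x] else ans)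
        else (oulaInnerL n x pr l, pr, ans)) from rfl]
      by_cases h : PySem.List.pyGetD l x false
      · rw [if_pos h]
        intro j hj
        rcases List.mem_append.mp hj with h' | h'
        · exact hpr j h'
        · simp only [List.mem_singleton] at h'; omega
      · rw [if_neg h]; exact hpr
    have := ih (fun y hy => hrng y (by simp [hy]))
      (oulaStepL n (l, pr, ans) x).1 (oulaStepL n (l, pr, ans) x).2.1
      (oulaStepL n (l, pr, ans) x).2.2 hpr'
    simpa using this

theorem oula_eq_oulaL (n : Int) : oula n = oulaL n := by
  show ((PySem.List.pyRange 2 (n + 1) 1).foldl (oulaStep n)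
      (Array.replicate (n + 1).toNat true, [], [])).2.2
    = ((PySem.List.pyRange 2 (n + 1) 1).foldl (oulaStepL n)
      (List.replicate (n + 1).toNat true, [], [])).2.2
  rw [show (Array.replicate (n + 1).toNat true) = (List.replicate (n + 1).toNat true).toArray by simp]
  rw [foldSimA n _ (by
      intro x hx
      have := (PySem.List.mem_pyRange_one.mp hx).1
      omega)
    _ _ _ (by intro j hj; simp at hj)]

theorem strikeSim (n i : Int) (hi : 0 ≤ i) (l : List Bool) :
    oulaStrike n i l.toArray = (oulaStrikeL n i l).toArray := by
  show (PySem.List.pyRange (2 * i) (n + 1) i).foldl (fun h t => h.setIfInBounds t.toNat false) l.toArray = _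
  rw [show oulaStrikeL n i l
      = (PySem.List.pyRange (2 * i) (n + 1) i).foldl (fun h t => PySem.List.pySetD h t false) l from rfl]
  by_cases hipos : 0 < i
  · have hmem : ∀ t ∈ PySem.List.pyRange (2 * i) (n + 1) i, 0 ≤ t := by
      intro t ht
      have := (PySem.List.mem_pyRange_iff_of_pos hipos t).mp ht
      omega
    clear hi
    generalize PySem.List.pyRange (2 * i) (n + 1) i = ts at hmem ⊢
    induction ts generalizing l with
    | nil => rfl
    | cons t ts ih =>
      simp only [List.foldl_cons]
      rw [asetd l t (hmem t (by simp))]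
      exact ih _ (fun y hy => hmem y (by simp [hy]))
  · have hz : i = 0 := by omega
    subst hz
    rw [show PySem.List.pyRange (2 * 0) (n + 1) 0 = [] from rfl]
    rfl

theorem stepSimB (n : Int) (l : List Bool) (ans : List Int) (i : Int) (hi : 0 ≤ i) :
    oulaAltStep n (l.toArray, ans) i
      = ((oulaAltStepL n (l, ans) i).1.toArray, (oulaAltStepL n (l, ans) i).2) := by
  show (if l.toArray.getD i.toNat false then _ else _) = _
  rw [agetd' l i hi]
  rw [show oulaAltStepL n (l, ans) i = (if PySem.List.pyGetD l i false then
      (oulaStrikeL n i l, if PySem.Int.mod i 10 == 1 then ans ++ [i] else ans)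
    else (l, ans)) from rfl]
  by_cases h : PySem.List.pyGetD l i false
  · rw [if_pos h, if_pos h, strikeSim n i hi l]
  · rw [if_neg h, if_neg h]

theorem foldSimB (n : Int) : ∀ (rng : List Int), (∀ x ∈ rng, 0 ≤ x) →
    ∀ (l : List Bool) (ans : List Int),
    rng.foldl (oulaAltStep n) (l.toArray, ans)
      = ((rng.foldl (oulaAltStepL n) (l, ans)).1.toArray,
          (rng.foldl (oulaAltStepL n) (l, ans)).2) := by
  intro rng
  induction rng with
  | nil => intro _ l ans; rfl
  | cons x rng ih =>
    intro hrng l ans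
    have hx : 0 ≤ x := hrng x (by simp)
    simp only [List.foldl_cons]
    rw [stepSimB n l ans x hx]
    have := ih (fun y hy => hrng y (by simp [hy]))
      (oulaAltStepL n (l, ans) x).1 (oulaAltStepL n (l, ans) x).2
    simpa using this

theorem oula_alt_eq_altL (n : Int) : oula_alt n = oula_altL n := by
  show ((PySem.List.pyRange 2 (n + 1) 1).foldl (oulaAltStep n)
      (Array.replicate (n + 1).toNat true, [])).2
    = ((PySem.List.pyRange 2 (n + 1) 1).foldl (oulaAltStepL n)
      (List.replicate (n + 1).toNat true, [])).2
  rw [show (Array.replicate (n + 1).toNat true) = (List.replicate (n + 1).toNat true).toArray by simp]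
  rw [foldSimB n _ (by
      intro x hx
      have := (PySem.List.mem_pyRange_one.mp hx).1
      omega) _ _]

-- ===== VERDICT (by name: the statement is the Claim_ definition above) =====
theorem oula_spec : Claim_equal_oula := by
  intro n _
  unfold Spec_oula
  rw [oula_eq_oulaL, oula_alt_eq_altL]
  exact oulaL_eq_altL n
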